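-- pv_equiv track=rewrite | github.com/jw9603/Python | Programmers/코딩기초트레이닝/Day5/1.py | solution
-- ===== SOURCE A (Python) =====
-- def solution(code):
--     answer = ''
--
--     mode = 0
--     for i in range(len(code)):
--         if mode == 0:
--             if code[i] == '1':
--                 mode = 1
--             else:
--                 if i % 2 == mode:
--                     answer += code[i]
--         else:
--             if code[i] == '1':
--                 mode = 0
--             else:
--                 if i%2 == mode:
--                     answer += code[i]
--
--     return answer if answer else 'EMPTY'
-- ===== SOURCE B (Python) =====
-- def solution(code):
--     # Split on '1': the toggle state machine disappears; segment k (0-based)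
--     # is processed in mode k % 2.  Within a segment starting at global offset
--     # `off`, the kept characters are every second one starting at in-segment
--     # position (k - off) % 2 -- walked directly with a stride-2 cursor.
--     pieces = []
--     off = 0
--     for k, seg in enumerate(code.split('1')):
--         p = (k - off) % 2
--         while p < len(seg):
--             pieces.append(seg[p])
--             p += 2
--         off += len(seg) + 1
--     res = ''.join(pieces)
--     return res if res else 'EMPTY'
-- ===== Notes on version B (the rewrite author's own statement) =====
-- stated objective: alternative
-- what changed: Eliminates the toggle-mode state machine: B splits the string on '1' (segment k is in mode k % 2) and walks each segment with a stride-2 cursor starting at (k - offset) % 2, joining the collected pieces.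
import Mathlib
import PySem

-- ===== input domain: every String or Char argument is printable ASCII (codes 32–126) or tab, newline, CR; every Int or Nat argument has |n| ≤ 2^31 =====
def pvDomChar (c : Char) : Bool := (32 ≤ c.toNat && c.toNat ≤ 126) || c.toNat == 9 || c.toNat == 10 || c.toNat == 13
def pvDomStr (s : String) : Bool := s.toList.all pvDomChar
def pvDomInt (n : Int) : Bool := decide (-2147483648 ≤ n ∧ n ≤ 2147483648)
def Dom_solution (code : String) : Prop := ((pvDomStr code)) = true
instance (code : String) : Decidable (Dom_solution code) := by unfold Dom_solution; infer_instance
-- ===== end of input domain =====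

-- B replaces A's toggle-mode state machine by splitting the string on '1' and walking
-- each segment with a stride-2 cursor; alternative decomposition, same values.

-- ===== PORT A =====
-- Python's `for i in range(len(code))` with `code[i]` is ported as a fold over the
-- index/character pairs (PySem.List.enumerate); every index is in range, so this is exact.
def solutionStep (st : List Char × Int) (p : Int × Char) : List Char × Int :=
  if st.2 == 0 then
    if p.2 == '1' then (st.1, 1)
    else if PySem.Int.mod p.1 2 == st.2 then (st.1 ++ [p.2], st.2) else st
  else
    if p.2 == '1' then (st.1, 0)
    else if PySem.Int.mod p.1 2 == st.2 then (st.1 ++ [p.2], st.2) else st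

def solution (code : String) : String :=
  let st := (PySem.List.enumerate code.toList 0).foldl solutionStep ([], 0)
  if st.1.isEmpty then "EMPTY" else String.mk st.1

-- ===== PORT B =====
-- Source B's inner `while p < len(seg): pieces.append(seg[p]); p += 2`; `p` is always ≥ 0
-- and `seg[p]` is only read with p < len(seg), so `getD` is exact here.
def strideWalk (seg : List Char) (p : Int) : List Char :=
  if _h : p < (seg.length : Int) then seg.getD p.toNat ' ' :: strideWalk seg (p + 2) else []
termination_by ((seg.length : Int) - p).toNat
decreasing_by omega

-- one iteration of Source B's `for k, seg in enumerate(code.split('1'))` loop;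
-- state = (pieces, off)
def altStep (st : List Char × Int) (q : Int × List Char) : List Char × Int :=
  let start := PySem.Int.mod (q.1 - st.2) 2
  (st.1 ++ strideWalk q.2 start, st.2 + q.2.length + 1)

def solution_alt (code : String) : String :=
  let segs := PySem.Chars.splitOn code.toList ['1']
  let st := (PySem.List.enumerate segs 0).foldl altStep ([], 0)
  if st.1.isEmpty then "EMPTY" else String.mk st.1

-- ===== PRECONDITION & SPEC =====
def Spec_solution (code : String) (out : String) : Prop := out = solution_alt code
instance (code : String) (out : String) : Decidable (Spec_solution code out) := by unfold Spec_solution; infer_instance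

-- ===== CLAIM (what is proved, stated in full; the proofs are below) =====
def Claim_equal_solution : Prop := ∀ (code : String), Dom_solution code → Spec_solution code (solution code)

-- ===== LEMMAS AND PROOFS =====

/-- The characters A keeps, as a recursion over the remaining characters:
`i` is the next global index, `m` the current mode. -/
def selN (i m : Nat) : List Char → List Char
  | [] => []
  | c :: t =>
    if c = '1' then selN (i + 1) (if m = 0 then 1 else 0) t
    else (if i % 2 = m then [c] else []) ++ selN (i + 1) m t

/-- A's final mode, mirrored on `Nat`. -/
def modeEnd (m : Nat) : List Char → Nat
  | [] => m
  | c :: t => modeEnd (if c = '1' then (if m = 0 then 1 else 0) else m) t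

lemma foldA_spec (cs : List Char) : ∀ (i m : Nat) (ans : List Char),
    (PySem.List.enumerate cs (i : Int)).foldl solutionStep (ans, (m : Int))
      = (ans ++ selN i m cs, (modeEnd m cs : Int)) := by
  induction cs with
  | nil => intro i m ans; simp [selN, modeEnd]
  | cons c t ih =>
    intro i m ans
    rw [PySem.List.enumerate_cons, List.foldl_cons]
    have h0 : ((m : Int) == 0) = decide (m = 0) := by
      by_cases hm : m = 0 <;> simp [hm]
    have hmod : (PySem.Int.mod (i : Int) 2 == (m : Int)) = decide (i % 2 = m) := by
      rw [show ((2:Int)) = ((2:Nat):Int) from rfl, PySem.Int.mod_natCast]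
      by_cases hp : i % 2 = m <;> simp [hp] <;> omega
    have hcast : (i : Int) + 1 = ((i + 1 : Nat) : Int) := by push_cast; ring
    simp only [solutionStep, h0, hmod]
    by_cases hm : m = 0 <;> by_cases hc : c = '1' <;> by_cases hp : i % 2 = m <;>
      simp only [hm] at hp ⊢ <;>
      simp [selN, modeEnd, hm, hc, hp] <;>
      rw [hcast] <;>
      first
        | exact_mod_cast ih (i + 1) 1 ans
        | exact_mod_cast ih (i + 1) 0 ans
        | exact_mod_cast ih (i + 1) m ans
        | (have h := ih (i + 1) 0 (ans ++ [c]); simpa [List.append_assoc] using h)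
        | (have h := ih (i + 1) m (ans ++ [c]); simpa [List.append_assoc] using h)

/-- Reference recursion for splitting on '1'. -/
def split1 (cur : List Char) : List Char → List (List Char)
  | [] => [cur]
  | c :: t => if c = '1' then cur :: split1 [] t else split1 (cur ++ [c]) t

lemma splitOn_go_spec : ∀ (fuel : Nat) (l cur : List Char) (acc : List (List Char)),
    l.length < fuel →
    PySem.Chars.splitOn.go ['1'] fuel l cur acc = acc.reverse ++ split1 cur.reverse l := by
  intro fuel
  induction fuel with
  | zero => intro l cur acc h; omega
  | succ n ih =>
    intro l cur acc h
    cases l with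
    | nil => simp [PySem.Chars.splitOn.go, split1]
    | cons c rest =>
      by_cases hc : c = '1'
      · have : PySem.Chars.splitOn.go ['1'] (n+1) (c :: rest) cur acc
            = PySem.Chars.splitOn.go ['1'] n rest [] (cur.reverse :: acc) := by
          simp [PySem.Chars.splitOn.go, List.isPrefixOf, hc]
        rw [this, ih rest [] (cur.reverse :: acc) (by simp at h ⊢; omega)]
        simp [split1, hc]
      · have : PySem.Chars.splitOn.go ['1'] (n+1) (c :: rest) cur acc
            = PySem.Chars.splitOn.go ['1'] n rest (c :: cur) acc := by
          simp [PySem.Chars.splitOn.go, List.isPrefixOf]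
          exact fun h1 => absurd h1.symm hc
        rw [this, ih rest (c :: cur) acc (by simp at h ⊢; omega)]
        simp [split1, hc]

lemma splitOn_eq_split1 (cs : List Char) :
    PySem.Chars.splitOn cs ['1'] = split1 [] cs := by
  unfold PySem.Chars.splitOn
  rw [splitOn_go_spec (cs.length + 1) cs [] [] (by omega)]
  simp

lemma split1_free (l : List Char) : ∀ cur, '1' ∉ l → split1 cur l = [cur ++ l] := by
  induction l with
  | nil => intro cur _; simp [split1]
  | cons c t ih =>
    intro cur h
    have hc : c ≠ '1' := fun hc => h (by simp [hc])
    rw [split1, if_neg hc, ih _ (fun ht => h (List.mem_cons_of_mem _ ht))]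
    simp

lemma split1_append (seg : List Char) : ∀ cur rest, '1' ∉ seg →
    split1 cur (seg ++ '1' :: rest) = (cur ++ seg) :: split1 [] rest := by
  induction seg with
  | nil => intro cur rest _; simp [split1]
  | cons c t ih =>
    intro cur rest h
    have hc : c ≠ '1' := fun hc => h (by simp [hc])
    rw [List.cons_append, split1, if_neg hc,
      ih _ rest (fun ht => h (List.mem_cons_of_mem _ ht))]
    simp

/-- Every second character, starting with the first. -/
def everyOther : List Char → List Char
  | [] => []
  | [c] => [c]
  | c :: _ :: t => c :: everyOther t

lemma everyOther_cons (c : Char) (t : List Char) :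
    everyOther (c :: t) = c :: everyOther t.tail := by
  cases t <;> simp [everyOther]

lemma strideWalk_eq (seg : List Char) (p : Nat) :
    strideWalk seg (p : Int) = everyOther (seg.drop p) := by
  by_cases h : p < seg.length
  · rw [strideWalk, dif_pos (by exact_mod_cast h)]
    have hd : seg.drop p = seg[p] :: seg.drop (p + 1) := List.drop_eq_getElem_cons h
    rw [hd, everyOther_cons, List.tail_drop]
    have : ((p : Int) + 2) = ((p + 2 : Nat) : Int) := by push_cast; ring
    rw [this, strideWalk_eq seg (p + 2)]
    simp [List.getD, List.getElem?_eq_getElem h]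
  · rw [strideWalk, dif_neg (by exact_mod_cast h)]
    rw [List.drop_eq_nil_of_le (by omega)]
    simp [everyOther]
termination_by seg.length - p
decreasing_by omega

lemma selN_free (seg : List Char) : ∀ (i m : Nat), '1' ∉ seg → m < 2 →
    selN i m seg = if i % 2 = m then everyOther seg else everyOther seg.tail := by
  induction seg with
  | nil => intro i m _ _; simp [selN, everyOther]
  | cons c t ih =>
    intro i m h hm
    have hc : c ≠ '1' := fun hc => h (by simp [hc])
    have ht : '1' ∉ t := fun ht => h (List.mem_cons_of_mem _ ht)
    rw [selN, if_neg hc, ih (i + 1) m ht hm, everyOther_cons]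
    by_cases hp : i % 2 = m
    · rw [if_pos hp, if_pos hp, if_neg (by omega)]
      simp
    · rw [if_neg hp, if_neg hp, if_pos (by omega)]
      simp

lemma selN_split (seg : List Char) : ∀ (i m : Nat) (rest : List Char), '1' ∉ seg →
    selN i m (seg ++ '1' :: rest)
      = selN i m seg ++ selN (i + seg.length + 1) (if m = 0 then 1 else 0) rest := by
  induction seg with
  | nil => intro i m rest _; simp [selN]
  | cons c t ih =>
    intro i m rest h
    have hc : c ≠ '1' := fun hc => h (by simp [hc])
    have ht : '1' ∉ t := fun ht => h (List.mem_cons_of_mem _ ht)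
    rw [List.cons_append, selN, if_neg hc, selN, if_neg hc, ih (i + 1) m rest ht]
    have e : i + (t.length + 1) + 1 = i + 1 + t.length + 1 := by omega
    simp [List.length_cons, List.append_assoc, e]

lemma dropWhile_head_false (p : Char → Bool) (l : List Char) (c : Char) (rest : List Char)
    (h : List.dropWhile p l = c :: rest) : p c = false := by
  induction l with
  | nil => simp [List.dropWhile] at h
  | cons a t ih =>
    rw [List.dropWhile_cons] at h
    by_cases ha : p a = true
    · rw [if_pos ha] at h; exact ih h
    · rw [if_neg ha] at h
      obtain ⟨rfl, -⟩ := List.cons.inj h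
      simpa using ha

lemma startVal (k i : Nat) :
    PySem.Int.mod ((k : Int) - (i : Int)) 2 = (((k + i) % 2 : Nat) : Int) := by
  rw [PySem.Int.mod_eq_emod_of_pos (by omega : (0:Int) < 2)]
  push_cast
  omega

lemma segPiece (seg : List Char) (k i : Nat) (h : '1' ∉ seg) :
    strideWalk seg (PySem.Int.mod ((k : Int) - (i : Int)) 2) = selN i (k % 2) seg := by
  rw [startVal, strideWalk_eq, selN_free seg i (k % 2) h (by omega)]
  by_cases hp : i % 2 = k % 2
  · rw [if_pos hp, show (k + i) % 2 = 0 by omega]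
    simp
  · rw [if_neg hp, show (k + i) % 2 = 1 by omega]
    cases seg <;> simp

lemma foldB_spec : ∀ (n : Nat) (cs : List Char), cs.length ≤ n →
    ∀ (pieces : List Char) (k i : Nat),
    (PySem.List.enumerate (split1 [] cs) (k : Int)).foldl altStep (pieces, (i : Int))
      = (pieces ++ selN i (k % 2) cs, (i : Int) + cs.length + 1) := by
  intro n
  induction n with
  | zero =>
    intro cs hcs pieces k i
    have : cs = [] := List.eq_nil_of_length_eq_zero (by omega)
    subst this
    rw [show split1 ([] : List Char) [] = [[]] from rfl]
    simp only [PySem.List.enumerate_cons, PySem.List.enumerate_nil, List.foldl_cons,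
      List.foldl_nil, altStep]
    rw [segPiece [] k i (by simp)]
  | succ n ih =>
    intro cs hcs pieces k i
    rcases hfree : cs.dropWhile (fun c => !(c == '1')) with _ | ⟨c, rest⟩
    · -- no '1' in cs
      have hcs1 : '1' ∉ cs := by
        intro hm
        have := List.takeWhile_append_dropWhile (p := fun c => !(c == '1')) (l := cs)
        rw [hfree, List.append_nil] at this
        rw [← this] at hm
        have := List.mem_takeWhile_imp hm
        simp at this
      rw [split1_free cs [] hcs1]
      simp only [PySem.List.enumerate_cons, PySem.List.enumerate_nil, List.foldl_cons,
        List.foldl_nil, altStep, List.nil_append]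
      rw [segPiece cs k i hcs1]
    · -- cs = seg ++ '1' :: rest with seg '1'-free
      have hhead : c = '1' := by
        have := dropWhile_head_false _ _ _ _ hfree
        simpa using this
      subst hhead
      set seg := cs.takeWhile (fun c => !(c == '1')) with hseg
      have hdecomp : cs = seg ++ '1' :: rest := by
        rw [hseg, ← hfree, List.takeWhile_append_dropWhile]
      have hsegfree : '1' ∉ seg := by
        intro hm
        have := List.mem_takeWhile_imp hm
        simp at this
      have hlen : seg.length + 1 + rest.length = cs.length := by
        rw [hdecomp]; simp; omega
      rw [hdecomp, split1_append seg [] rest hsegfree]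
      simp only [List.nil_append, PySem.List.enumerate_cons, List.foldl_cons, altStep]
      rw [segPiece seg k i hsegfree]
      have hcast1 : (k : Int) + 1 = ((k + 1 : Nat) : Int) := by push_cast; ring
      have hcast2 : (i : Int) + (seg.length : Int) + 1
          = ((i + seg.length + 1 : Nat) : Int) := by push_cast; ring
      rw [hcast1, hcast2, ih rest (by omega) _ (k + 1) (i + seg.length + 1)]
      rw [selN_split seg i (k % 2) rest hsegfree]
      have hmode : (if k % 2 = 0 then 1 else 0) = (k + 1) % 2 := by
        rcases Nat.mod_two_eq_zero_or_one k with h | h <;> simp [h] <;> omega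
      rw [hmode]
      refine Prod.ext ?_ ?_
      · simp [List.append_assoc]
      · simp only [List.length_append, List.length_cons]
        push_cast
        omega

theorem solution_spec : Claim_equal_solution := by
  intro code _
  show solution code = solution_alt code
  simp only [solution, solution_alt]
  rw [splitOn_eq_split1]
  have hA := foldA_spec code.toList 0 0 []
  have hB := foldB_spec code.toList.length code.toList (le_refl _) [] 0 0
  norm_num at hA hB
  rw [hA, hB]
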